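-- pv_equiv track=rewrite | github.com/qudwn1114/Algorithm | Programmers/코딩테스트 입문/공 던지기.py | solution
-- ===== SOURCE A (Python) =====
-- def solution(numbers, k):
--     idx = 0
--     for i in range(k-1):
--         idx += 2
--         if idx > len(numbers) - 1:
--             idx -= len(numbers)
--
--     answer = numbers[idx]
--     return answer
-- ===== SOURCE B (Python) =====
-- def solution(numbers, k):
--     steps = k - 1 if k > 1 else 0
--     return numbers[(2 * steps) % len(numbers)]
-- ===== Notes on version B (the rewrite author's own statement) =====
-- stated objective: faster
-- what changed: B replaces A's k-1 step simulation loop (+2 with wraparound each iteration) by the closed-form index (2*(k-1)) % len(numbers).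
import Mathlib
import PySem

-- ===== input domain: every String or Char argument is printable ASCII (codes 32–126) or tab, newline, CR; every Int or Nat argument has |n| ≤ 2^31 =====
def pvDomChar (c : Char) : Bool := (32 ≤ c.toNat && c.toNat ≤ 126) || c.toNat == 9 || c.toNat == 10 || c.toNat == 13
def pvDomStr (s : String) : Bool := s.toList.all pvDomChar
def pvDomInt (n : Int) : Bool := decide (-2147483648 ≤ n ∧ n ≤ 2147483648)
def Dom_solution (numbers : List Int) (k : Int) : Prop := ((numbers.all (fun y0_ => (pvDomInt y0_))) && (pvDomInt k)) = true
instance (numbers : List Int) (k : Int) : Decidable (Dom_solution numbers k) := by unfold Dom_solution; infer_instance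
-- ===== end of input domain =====

-- B replaces A's O(k) step-by-step simulation by the O(1) closed-form index (2*(k-1)) % len.

-- ===== PORT A =====
-- for i in range(k-1): idx += 2; if idx > len-1: idx -= len
def solution (numbers : List Int) (k : Int) : Int :=
  let idx := (PySem.List.pyRange 0 (k - 1) 1).foldl
    (fun idx _ =>
      let idx := idx + 2
      if idx > (numbers.length : Int) - 1 then idx - (numbers.length : Int) else idx) 0
  (PySem.List.pyGet? numbers idx).getD 0   -- numbers[idx]; none (IndexError) excluded by Pre_

-- ===== PORT B =====
def solution_alt (numbers : List Int) (k : Int) : Int :=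
  let steps := if k > 1 then k - 1 else 0
  (PySem.List.pyGet? numbers (PySem.Int.mod (2 * steps) (numbers.length : Int))).getD 0

-- ===== PRECONDITION & SPEC =====
-- Pre_ excludes the empty list (both raise) and the one-element list with k ≥ 2, where A's
-- single wraparound subtraction per step lets the index drift out of range and A raises IndexError.
def Pre_solution (numbers : List Int) (k : Int) : Prop :=
  numbers ≠ [] ∧ (2 ≤ numbers.length ∨ k ≤ 1)
instance (numbers : List Int) (k : Int) : Decidable (Pre_solution numbers k) := by
  unfold Pre_solution; infer_instance
def pvWitness_solution : List Int × Int := ([1, 2, 3, 4], 5)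

def Spec_solution (numbers : List Int) (k : Int) (out : Int) : Prop := out = solution_alt numbers k
instance (numbers : List Int) (k : Int) (out : Int) : Decidable (Spec_solution numbers k out) := by unfold Spec_solution; infer_instance

-- ===== CLAIM (what is proved, stated in full; the proofs are below) =====
def Claim_equal_solution : Prop := ∀ (numbers : List Int) (k : Int), Dom_solution numbers k → Pre_solution numbers k → Spec_solution numbers k (solution numbers k)

-- ===== LEMMAS AND PROOFS =====

-- Invariant: with n ≥ 2, after m iterations A's index is (2*m) % n.
lemma pvLoop_closed (n : Int) (hn : 2 ≤ n) (m : Nat) :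
    (PySem.List.pyRange 0 (m : Int) 1).foldl
      (fun idx _ => let idx := idx + 2; if idx > n - 1 then idx - n else idx) 0
      = PySem.Int.mod (2 * (m : Int)) n := by
  induction m with
  | zero =>
    simp [PySem.List.pyRange_one_eq_nil (by omega : (0:Int) ≤ 0)]
    rw [PySem.Int.mod_eq_emod_of_pos (by omega)]
    simp
  | succ m ih =>
    rw [show ((m + 1 : Nat) : Int) = (m : Int) + 1 by push_cast; ring,
        PySem.List.pyRange_one_succ_right (by positivity : (0:Int) ≤ (m : Int)),
        List.foldl_append, ih]
    simp only [List.foldl_cons, List.foldl_nil]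
    rw [PySem.Int.mod_eq_emod_of_pos (by omega), PySem.Int.mod_eq_emod_of_pos (by omega)]
    have h0 : 0 ≤ (2 * (m : Int)) % n := Int.emod_nonneg _ (by omega)
    have h1 : (2 * (m : Int)) % n < n := Int.emod_lt_of_pos _ (by omega)
    have key : 2 * ((m : Int) + 1) % n = (2 * (m : Int) % n + 2) % n := by
      rw [show 2 * ((m : Int) + 1) = 2 * (m : Int) + 2 by ring, Int.add_emod,
          Int.add_emod (2 * (m : Int) % n) 2, Int.emod_emod_of_dvd _ dvd_rfl]
    rw [key]
    split_ifs with hgt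
    · have hx : (2 * (m : Int) % n + 2) % n = (2 * (m : Int) % n + 2 - n) % n := by
        conv_lhs => rw [show 2 * (m : Int) % n + 2 = (2 * (m : Int) % n + 2 - n) + n * 1 by ring]
        rw [Int.add_mul_emod_self_left]
      have he : (2 * (m : Int) % n + 2 - n) % n = 2 * (m : Int) % n + 2 - n :=
        Int.emod_eq_of_lt (by omega) (by omega)
      rw [hx, he]
    · have he : (2 * (m : Int) % n + 2) % n = 2 * (m : Int) % n + 2 :=
        Int.emod_eq_of_lt (by omega) (by omega)
      rw [he]

theorem solution_spec : Claim_equal_solution := by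
  intro numbers k _ ⟨hne, hp⟩
  unfold Spec_solution solution solution_alt
  have hlen : 1 ≤ numbers.length := List.length_pos_iff.mpr hne
  by_cases hk : k > 1
  · rcases hp with h2 | h1
    · have hm : k - 1 = ((k - 1).toNat : Int) := by omega
      rw [hm, pvLoop_closed (numbers.length : Int) (by exact_mod_cast h2) (k - 1).toNat,
          if_pos hk, hm]
    · omega
  · rw [PySem.List.pyRange_one_eq_nil (by omega)]
    simp only [List.foldl_nil, if_neg hk]
    rw [show (2 : Int) * 0 = 0 by ring,
        PySem.Int.mod_eq_emod_of_pos (by exact_mod_cast hlen)]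
    simp
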